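-- pv_equiv track=rewrite | github.com/ainghazal/data | oonidata/datautils.py | is_ipv4_bogon
-- ===== SOURCE A (Python) =====
-- import ipaddress
--
-- bogon_ipv4_ranges = [
--     ipaddress.ip_network("0.0.0.0/8"),  # "This" network
--     ipaddress.ip_network("10.0.0.0/8"),  # Private-use networks
--     ipaddress.ip_network("100.64.0.0/10"),  # Carrier-grade NAT
--     ipaddress.ip_network("127.0.0.0/8"),  # Loopback
--     ipaddress.ip_network("169.254.0.0/16"),  # Link local
--     ipaddress.ip_network("172.16.0.0/12"),  # Private-use networks
--     ipaddress.ip_network("192.0.0.0/24"),  # IETF protocol assignments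
--     ipaddress.ip_network("192.0.2.0/24"),  # TEST-NET-1
--     ipaddress.ip_network("192.168.0.0/16"),  # Private-use networks
--     # Network interconnect device benchmark testing
--     ipaddress.ip_network("198.18.0.0/15"),
--     ipaddress.ip_network("198.51.100.0/24"),  # TEST-NET-2
--     ipaddress.ip_network("203.0.113.0/24"),  # TEST-NET-3
--     ipaddress.ip_network("224.0.0.0/3"),  # Multicast
-- ]
--
-- def is_ipv4_bogon(ip: str) -> bool:
--     try:
--         ipv4addr = ipaddress.IPv4Address(ip)
--     except ipaddress.AddressValueError:
--         return False
--     if any([ipv4addr in ip_range for ip_range in bogon_ipv4_ranges]):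
--         return True
--     return False
-- ===== SOURCE B (Python) =====
-- def is_ipv4_bogon(ip: str) -> bool:
--     parts = ip.split(".")
--     if len(parts) != 4:
--         return False
--     octs = []
--     for p in parts:
--         if not p.isdigit() or len(p) > 3 or (len(p) > 1 and p[0] == "0"):
--             return False
--         n = int(p)
--         if n > 255:
--             return False
--         octs.append(n)
--     a, b, c, _d = octs
--     # the bogon table read off the leading octets, in table order
--     return (a == 0
--             or (a == 10
--             or ((a == 100 and 64 <= b <= 127)
--             or (a == 127
--             or ((a == 169 and b == 254)
--             or ((a == 172 and 16 <= b <= 31)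
--             or ((a == 192 and b == 0 and c == 0)
--             or ((a == 192 and b == 0 and c == 2)
--             or ((a == 192 and b == 168)
--             or ((a == 198 and (b == 18 or b == 19))
--             or ((a == 198 and b == 51 and c == 100)
--             or ((a == 203 and b == 0 and c == 113)
--             or a >= 224))))))))))))
-- ===== Notes on version B (the rewrite author's own statement) =====
-- stated objective: alternative
-- what changed: Replaced ipaddress-object parsing plus a containment scan over 13 network objects by a hand-rolled dotted-quad validator and a direct boolean bogon test on the leading octets (no 32-bit address integer, no interval scan).
import Mathlib
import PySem

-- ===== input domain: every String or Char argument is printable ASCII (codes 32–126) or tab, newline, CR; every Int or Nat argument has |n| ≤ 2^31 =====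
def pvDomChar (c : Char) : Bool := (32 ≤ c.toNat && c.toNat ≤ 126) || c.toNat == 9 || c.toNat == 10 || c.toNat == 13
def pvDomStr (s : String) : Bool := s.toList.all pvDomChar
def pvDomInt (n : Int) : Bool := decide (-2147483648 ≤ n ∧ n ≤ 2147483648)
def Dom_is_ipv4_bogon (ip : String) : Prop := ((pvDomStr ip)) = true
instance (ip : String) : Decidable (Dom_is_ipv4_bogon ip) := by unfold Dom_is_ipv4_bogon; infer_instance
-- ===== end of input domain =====

-- B drops the ipaddress machinery: it validates the dotted quad by hand and reads
-- bogon-ness directly off the leading octets, with no 32-bit address integer and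
-- no interval scan; objective: alternative.

-- ===== PORT A =====
-- ipaddress.IPv4Address(ip) parsing (CPython _ip_int_from_string): split on '.',
-- exactly 4 octets; per octet: nonempty, decimal digits only, at most 3 chars,
-- no leading zero, value ≤ 255; combine to the 32-bit address integer.
def pvOctet? (cs : List Char) : Option Int :=
  if cs = [] then none
  else if ¬ cs.all (fun c => '0' ≤ c && c ≤ '9') then none
  else if cs.length > 3 then none
  else if cs.length > 1 && cs.headD '0' = '0' then none
  else
    let v : Int := cs.foldl (fun a c => a * 10 + ((c.toNat : Int) - 48)) 0
    if v > 255 then none else some v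

def pvParseIPv4? (ip : String) : Option Int :=
  match PySem.Chars.splitOn ip.toList ['.'] with
  | [a, b, c, d] =>
    match pvOctet? a, pvOctet? b, pvOctet? c, pvOctet? d with
    | some x, some y, some z, some w => some (((x * 256 + y) * 256 + z) * 256 + w)
    | _, _, _, _ => none
  | _ => none

-- Each bogon network as its (network_address, broadcast_address) integer pair;
-- Python's 'addr in net' is exactly net_addr ≤ int(addr) ≤ broadcast_addr.
def bogon_ipv4_ranges : List (Int × Int) :=
  [ (0, 16777215),                 -- 0.0.0.0/8
    (167772160, 184549375),        -- 10.0.0.0/8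
    (1681915904, 1686110207),      -- 100.64.0.0/10
    (2130706432, 2147483647),      -- 127.0.0.0/8
    (2851995648, 2852061183),      -- 169.254.0.0/16
    (2886729728, 2887778303),      -- 172.16.0.0/12
    (3221225472, 3221225727),      -- 192.0.0.0/24
    (3221225984, 3221226239),      -- 192.0.2.0/24
    (3232235520, 3232301055),      -- 192.168.0.0/16
    (3323068416, 3323199487),      -- 198.18.0.0/15
    (3325256704, 3325256959),      -- 198.51.100.0/24
    (3405803776, 3405804031),      -- 203.0.113.0/24
    (3758096384, 4294967295) ]     -- 224.0.0.0/3

def is_ipv4_bogon (ip : String) : Bool :=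
  match pvParseIPv4? ip with
  | none => false          -- except AddressValueError: return False
  | some v =>
    -- any([ipv4addr in ip_range for ip_range in bogon_ipv4_ranges])
    if (bogon_ipv4_ranges.map (fun r => decide (r.1 ≤ v ∧ v ≤ r.2))).any id then true
    else false

-- ===== PORT B =====
-- one octet of Source B's loop body: p.isdigit() and the length / leading-zero /
-- ≤ 255 checks, an early 'return False' (none) where any fails.
def altOct? (p : List Char) : Option Int :=
  if !(decide (p ≠ []) && p.all PySem.Chars.isdigit)
      || decide (p.length > 3)
      || (decide (p.length > 1) && (p.headD ' ' == '0')) then none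
  else
    let n : Int := p.foldl (fun a c => a * 10 + ((c.toNat : Int) - 48)) 0
    if n > 255 then none else some n

-- Source B's final return: the bogon table read off the leading octets.
def altBogonTest (a b c : Int) : Bool :=
  decide (a = 0)
    || (decide (a = 10)
    || ((decide (a = 100) && (decide (64 ≤ b) && decide (b ≤ 127)))
    || (decide (a = 127)
    || ((decide (a = 169) && decide (b = 254))
    || ((decide (a = 172) && (decide (16 ≤ b) && decide (b ≤ 31)))
    || (((decide (a = 192) && decide (b = 0)) && decide (c = 0))
    || (((decide (a = 192) && decide (b = 0)) && decide (c = 2))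
    || ((decide (a = 192) && decide (b = 168))
    || ((decide (a = 198) && (decide (b = 18) || decide (b = 19)))
    || (((decide (a = 198) && decide (b = 51)) && decide (c = 100))
    || (((decide (a = 203) && decide (b = 0)) && decide (c = 113))
    || decide (224 ≤ a))))))))))))

def is_ipv4_bogon_alt (ip : String) : Bool :=
  match PySem.Chars.splitOn ip.toList ['.'] with
  | [p1, p2, p3, p4] =>
    match altOct? p1, altOct? p2, altOct? p3, altOct? p4 with
    | some a, some b, some c, some _ => altBogonTest a b c
    | _, _, _, _ => false
  | _ => false

-- ===== PRECONDITION & SPEC =====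
def Spec_is_ipv4_bogon (ip : String) (out : Bool) : Prop := out = is_ipv4_bogon_alt ip
instance (ip : String) (out : Bool) : Decidable (Spec_is_ipv4_bogon ip out) := by unfold Spec_is_ipv4_bogon; infer_instance

-- ===== CLAIM (what is proved, stated in full; the proofs are below) =====
def Claim_equal_is_ipv4_bogon : Prop := ∀ (ip : String), Dom_is_ipv4_bogon ip → Spec_is_ipv4_bogon ip (is_ipv4_bogon ip)

-- ===== LEMMAS AND PROOFS =====

-- collapse a nested if-chain returning none into one disjunctive guard
lemma pv_if_or {α : Type} (P Q : Prop) [Decidable P] [Decidable Q] (x : Option α) :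
    (if P then (none : Option α) else if Q then none else x) = if P ∨ Q then none else x := by
  split_ifs <;> tauto

-- the two octet validators agree
lemma pv_oct_agree (p : List Char) : pvOctet? p = altOct? p := by
  cases p with
  | nil => simp [pvOctet?, altOct?]
  | cons c cs =>
    have hdig : PySem.Chars.isdigit = (fun x : Char => decide ('0' ≤ x) && decide (x ≤ '9')) := by
      funext x; rfl
    simp only [pvOctet?, altOct?, hdig]
    simp
    rw [pv_if_or, pv_if_or]
    exact if_congr (by simp only [Decidable.imp_iff_not_or, not_le, or_assoc]) rfl rfl

-- a validated octet lies in [0, 255]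
lemma pv_oct_bounds (p : List Char) (n : Int) (h : altOct? p = some n) : 0 ≤ n ∧ n ≤ 255 := by
  unfold altOct? at h
  simp only [gt_iff_lt] at h
  split_ifs at h with hguard hgt
  obtain rfl := Option.some.inj h
  refine ⟨?_, by omega⟩
  have hall : ∀ x ∈ p, PySem.Chars.isdigit x := by
    simp only [Bool.or_eq_true, Bool.and_eq_true, Bool.not_eq_true', not_or] at hguard
    have h1 := hguard.1.1
    simp only [Bool.not_eq_false, Bool.and_eq_true, List.all_eq_true, decide_eq_true_eq] at h1
    exact fun x hx => h1.2 x hx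
  have gen : ∀ (cs : List Char) (a : Int), (∀ x ∈ cs, PySem.Chars.isdigit x) → 0 ≤ a →
      0 ≤ cs.foldl (fun a c => a * 10 + ((c.toNat : Int) - 48)) a := by
    intro cs
    induction cs with
    | nil => intro a _ ha; simpa using ha
    | cons c cs ih =>
      intro a hd ha
      simp only [List.foldl_cons]
      apply ih _ (fun x hx => hd x (List.mem_cons_of_mem _ hx))
      have hc := hd c List.mem_cons_self
      simp only [PySem.Chars.isdigit, Bool.and_eq_true, decide_eq_true_eq] at hc
      have h48 : ('0' : Char).toNat ≤ c.toNat := by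
        simpa [Char.le_def] using hc.1
      have h0 : ('0' : Char).toNat = 48 := by decide
      have : (48 : Int) ≤ (c.toNat : Int) := by omega
      omega
  exact gen p 0 hall le_rfl

-- each bogon interval, as a condition on the octets of the address
lemma pv_intervals (x y z w v : Int)
    (hx : 0 ≤ x ∧ x ≤ 255) (hy : 0 ≤ y ∧ y ≤ 255) (hz : 0 ≤ z ∧ z ≤ 255) (hw : 0 ≤ w ∧ w ≤ 255)
    (hv : v = 16777216 * x + 65536 * y + 256 * z + w) :
    ((0 ≤ v ∧ v ≤ 16777215) ↔ x = 0) ∧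
    ((167772160 ≤ v ∧ v ≤ 184549375) ↔ x = 10) ∧
    ((1681915904 ≤ v ∧ v ≤ 1686110207) ↔ (x = 100 ∧ (64 ≤ y ∧ y ≤ 127))) ∧
    ((2130706432 ≤ v ∧ v ≤ 2147483647) ↔ x = 127) ∧
    ((2851995648 ≤ v ∧ v ≤ 2852061183) ↔ (x = 169 ∧ y = 254)) ∧
    ((2886729728 ≤ v ∧ v ≤ 2887778303) ↔ (x = 172 ∧ (16 ≤ y ∧ y ≤ 31))) ∧
    ((3221225472 ≤ v ∧ v ≤ 3221225727) ↔ ((x = 192 ∧ y = 0) ∧ z = 0)) ∧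
    ((3221225984 ≤ v ∧ v ≤ 3221226239) ↔ ((x = 192 ∧ y = 0) ∧ z = 2)) ∧
    ((3232235520 ≤ v ∧ v ≤ 3232301055) ↔ (x = 192 ∧ y = 168)) ∧
    ((3323068416 ≤ v ∧ v ≤ 3323199487) ↔ (x = 198 ∧ (y = 18 ∨ y = 19))) ∧
    ((3325256704 ≤ v ∧ v ≤ 3325256959) ↔ ((x = 198 ∧ y = 51) ∧ z = 100)) ∧
    ((3405803776 ≤ v ∧ v ≤ 3405804031) ↔ ((x = 203 ∧ y = 0) ∧ z = 113)) ∧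
    ((3758096384 ≤ v ∧ v ≤ 4294967295) ↔ 224 ≤ x) := by
  omega

-- the interval scan over the 13 bogon ranges equals the octet condition
lemma pv_scan_eq (x y z w : Int)
    (hx : 0 ≤ x ∧ x ≤ 255) (hy : 0 ≤ y ∧ y ≤ 255) (hz : 0 ≤ z ∧ z ≤ 255) (hw : 0 ≤ w ∧ w ≤ 255) :
    (if (bogon_ipv4_ranges.map
          (fun r => decide (r.1 ≤ ((x * 256 + y) * 256 + z) * 256 + w ∧ ((x * 256 + y) * 256 + z) * 256 + w ≤ r.2))).any id
        then true else false)
      = altBogonTest x y z := by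
  have hb : ∀ b : Bool, (if b then true else false) = b := by decide
  rw [hb]
  obtain ⟨v, hv⟩ : ∃ v : Int, ((x * 256 + y) * 256 + z) * 256 + w = v := ⟨_, rfl⟩
  rw [hv]
  have hv' : v = 16777216 * x + 65536 * y + 256 * z + w := by rw [← hv]; ring
  obtain ⟨e1, e2, e3, e4, e5, e6, e7, e8, e9, e10, e11, e12, e13⟩ :=
    pv_intervals x y z w v hx hy hz hw hv'
  rw [Bool.eq_iff_iff]
  simp only [bogon_ipv4_ranges, altBogonTest, List.map_cons, List.map_nil, List.any_cons,
    List.any_nil, id_eq, Bool.or_false, Bool.or_eq_true, Bool.and_eq_true, decide_eq_true_eq]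
  rw [e1, e2, e3, e4, e5, e6, e7, e8, e9, e10, e11, e12, e13]

-- ===== VERDICT (by name: the statement is the Claim_ definition above) =====
theorem is_ipv4_bogon_spec : Claim_equal_is_ipv4_bogon := by
  intro ip _
  unfold Spec_is_ipv4_bogon is_ipv4_bogon is_ipv4_bogon_alt pvParseIPv4?
  cases hsegs : PySem.Chars.splitOn ip.toList ['.'] with
  | nil => simp
  | cons p1 rest =>
    match rest with
    | [] => simp
    | [p2] => simp
    | [p2, p3] => simp
    | [p2, p3, p4] =>
      simp only [pv_oct_agree]
      cases h1 : altOct? p1 <;> cases h2 : altOct? p2 <;> cases h3 : altOct? p3 <;> cases h4 : altOct? p4 <;>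
        simp only []
      case some.some.some.some a b c d =>
        exact pv_scan_eq a b c d (pv_oct_bounds _ _ h1) (pv_oct_bounds _ _ h2) (pv_oct_bounds _ _ h3) (pv_oct_bounds _ _ h4)
    | p2 :: p3 :: p4 :: p5 :: tl => simp
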